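-- pv_equiv track=rewrite | github.com/JulianSMatthews/ai-coach | app/daily_habits.py | _has_complete_day_plan_items
-- ===== SOURCE A (Python) =====
-- from typing import Any
--
-- _DAY_MOMENT_SEQUENCE = (
--     ("morning", "Morning"),
--     ("midday", "Midday"),
--     ("afternoon", "Afternoon"),
--     ("evening", "Evening"),
-- )
--
-- def _normalize_moment_key(value: Any) -> str | None:
--     token = str(value or "").strip().lower().replace("-", "_").replace(" ", "_")
--     mapping = {
--         "morning": "morning",
--         "am": "morning",
--         "start_of_day": "morning",
--         "midday": "midday",
--         "mid_day": "midday",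
--         "lunch": "midday",
--         "pretraining": "afternoon",
--         "pre_training": "afternoon",
--         "afternoon": "afternoon",
--         "training": "afternoon",
--         "session": "afternoon",
--         "evening": "evening",
--         "pm": "evening",
--         "night": "evening",
--         "close_of_day": "evening",
--     }
--     return mapping.get(token) or None
--
-- def _has_complete_day_plan_items(items: list[dict[str, Any]]) -> bool:
--     if len(items) < len(_DAY_MOMENT_SEQUENCE):
--         return False
--     keys = {
--         _normalize_moment_key(item.get("moment_key"))
--         for item in items
--         if isinstance(item, dict)
--     }
--     required_keys = {key for key, _label in _DAY_MOMENT_SEQUENCE}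
--     return required_keys.issubset({key for key in keys if key})
-- ===== SOURCE B (Python) =====
-- from typing import Any
--
-- _DAY_MOMENT_SEQUENCE = (
--     ("morning", "Morning"),
--     ("midday", "Midday"),
--     ("afternoon", "Afternoon"),
--     ("evening", "Evening"),
-- )
--
-- _MOMENT_ALIASES = (
--     ("morning", ("morning", "am", "start_of_day")),
--     ("midday", ("midday", "mid_day", "lunch")),
--     ("afternoon", ("pretraining", "pre_training", "afternoon", "training", "session")),
--     ("evening", ("evening", "pm", "night", "close_of_day")),
-- )
--
-- def _moment_token(value: Any) -> str:
--     return str(value or "").strip().lower().replace("-", "_").replace(" ", "_")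
--
-- def _has_complete_day_plan_items(items: list[dict[str, Any]]) -> bool:
--     # Probe the items once per required moment, matching against that moment's
--     # alias tokens directly; the length guard of the original is redundant
--     # because each item accounts for at most one moment.
--     return all(
--         any(
--             isinstance(item, dict) and _moment_token(item.get("moment_key")) in aliases
--             for item in items
--         )
--         for _moment, aliases in _MOMENT_ALIASES
--     )
-- ===== Notes on version B (the rewrite author's own statement) =====
-- stated objective: alternative
-- what changed: Instead of normalizing every item through a 15-entry alias dictionary into a deduplicated set and testing subset inclusion behind a length guard, B scans the items once per required moment and matches the item's normalized token directly against that moment's alias tuple; the length guard is dropped because it is provably redundant.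
import Mathlib
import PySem

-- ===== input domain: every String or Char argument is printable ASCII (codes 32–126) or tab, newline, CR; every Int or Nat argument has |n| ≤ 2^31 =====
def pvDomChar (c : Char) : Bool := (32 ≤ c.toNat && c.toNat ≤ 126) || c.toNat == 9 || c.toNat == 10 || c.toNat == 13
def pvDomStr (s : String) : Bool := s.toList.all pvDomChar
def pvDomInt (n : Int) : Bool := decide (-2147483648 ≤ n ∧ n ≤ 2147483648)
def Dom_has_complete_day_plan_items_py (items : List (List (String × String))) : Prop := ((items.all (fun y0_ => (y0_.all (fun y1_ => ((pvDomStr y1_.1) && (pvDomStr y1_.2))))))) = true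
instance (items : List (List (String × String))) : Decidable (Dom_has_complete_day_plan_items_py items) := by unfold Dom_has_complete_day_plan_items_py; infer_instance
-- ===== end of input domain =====

-- B changes: instead of normalizing every item through the alias dictionary into a
-- deduplicated set and testing subset inclusion behind a length guard, B scans the
-- items once per required moment, matching each item's normalized token against that
-- moment's alias list; the length guard is dropped (provably redundant). Alternative
-- decomposition, same cost.

-- ===== PORT A =====
-- the module constant _DAY_MOMENT_SEQUENCE
def dayMomentSequence : List (String × String) :=
  [("morning", "Morning"), ("midday", "Midday"), ("afternoon", "Afternoon"), ("evening", "Evening")]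

-- the dict literal inside _normalize_moment_key
def mappingItems : List (String × String) :=
  [("morning", "morning"), ("am", "morning"), ("start_of_day", "morning"),
   ("midday", "midday"), ("mid_day", "midday"), ("lunch", "midday"),
   ("pretraining", "afternoon"), ("pre_training", "afternoon"), ("afternoon", "afternoon"),
   ("training", "afternoon"), ("session", "afternoon"),
   ("evening", "evening"), ("pm", "evening"), ("night", "evening"), ("close_of_day", "evening")]

-- helper _normalize_moment_key: str(value or "").strip().lower().replace("-","_")
-- .replace(" ","_"), then mapping.get(token) or None
def normalize_moment_key_py (value : Option String) : Option String :=
  -- `value or ""`: value if it is a truthy (non-empty) string, else ""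
  let base : String := match value with
    | some s => if s = "" then "" else s
    | none => ""
  let token := PySem.Str.replace (PySem.Str.replace (PySem.Str.lower (PySem.Str.strip base)) "-" "_") " " "_"
  let mapping : PySem.Dict String String := PySem.Dict.ofList mappingItems
  -- `mapping.get(token) or None`: a falsy (absent or empty) result becomes None
  (mapping.get? token).bind (fun s => if s = "" then none else some s)

def has_complete_day_plan_items_py (items : List (List (String × String))) : Bool :=
  if items.length < dayMomentSequence.length then false
  else
    -- every item is a dict under the type convention, so the isinstance filter keeps all items
    let keys : PySem.Set (Option String) :=
      PySem.Set.ofList (items.map (fun item =>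
        normalize_moment_key_py ((PySem.Dict.mk item).get? "moment_key")))
    let requiredKeys : PySem.Set String := PySem.Set.ofList (dayMomentSequence.map (·.1))
    -- {key for key in keys if key}: set comprehension over a set, result order-independent
    let truthy : PySem.Set String := PySem.Set.ofList (keys.filterMap id)
    PySem.Set.issubset requiredKeys truthy

-- ===== PORT B =====
-- the module constant _MOMENT_ALIASES
def momentAliases : List (String × List String) :=
  [("morning", ["morning", "am", "start_of_day"]),
   ("midday", ["midday", "mid_day", "lunch"]),
   ("afternoon", ["pretraining", "pre_training", "afternoon", "training", "session"]),
   ("evening", ["evening", "pm", "night", "close_of_day"])]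

-- helper _moment_token: str(value or "").strip().lower().replace("-","_").replace(" ","_")
def moment_token_py (value : Option String) : String :=
  let base : String := match value with
    | some s => if s = "" then "" else s
    | none => ""
  PySem.Str.replace (PySem.Str.replace (PySem.Str.lower (PySem.Str.strip base)) "-" "_") " " "_"

def has_complete_day_plan_items_py_alt (items : List (List (String × String))) : Bool :=
  momentAliases.all (fun p =>
    items.any (fun item =>
      -- isinstance(item, dict) is always true under the type convention
      p.2.contains (moment_token_py ((PySem.Dict.mk item).get? "moment_key"))))

-- ===== PRECONDITION & SPEC =====
def Spec_has_complete_day_plan_items_py (items : List (List (String × String))) (out : Bool) : Prop := out = has_complete_day_plan_items_py_alt items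
instance (items : List (List (String × String))) (out : Bool) : Decidable (Spec_has_complete_day_plan_items_py items out) := by unfold Spec_has_complete_day_plan_items_py; infer_instance

-- ===== CLAIM =====
def Claim_equal_has_complete_day_plan_items_py : Prop := ∀ (items : List (List (String × String))), Dom_has_complete_day_plan_items_py items → Spec_has_complete_day_plan_items_py items (has_complete_day_plan_items_py items)

-- ===== LEMMAS AND PROOFS =====

-- A's normalization and B's tokenization share the same pipeline
theorem normalize_eq_bind (v : Option String) :
    normalize_moment_key_py v =
      ((PySem.Dict.ofList mappingItems).get? (moment_token_py v)).bind
        (fun s => if s = "" then none else some s) := rfl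

theorem ofList_mappingItems : PySem.Dict.ofList mappingItems = PySem.Dict.mk mappingItems := by
  decide

theorem get?_mappingItems (t s : String) :
    (PySem.Dict.ofList mappingItems).get? t = some s ↔ (t, s) ∈ mappingItems := by
  rw [PySem.Dict.get?_eq_some_iff_mem_items]
  · rw [ofList_mappingItems]
  · exact PySem.Dict.nodup_keys_ofList _

-- finite facts about the literal tables, all checked by decide
theorem alias_to_mapping : ∀ p ∈ momentAliases, ∀ t ∈ p.2, (t, p.1) ∈ mappingItems := by decide

theorem mapping_to_alias : ∀ q ∈ mappingItems, ∀ p ∈ momentAliases, q.2 = p.1 → q.1 ∈ p.2 := by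
  decide

theorem moment_ne_empty : ∀ p ∈ momentAliases, p.1 ≠ "" := by decide

theorem moment_in_sequence : ∀ p ∈ momentAliases, ∃ a ∈ dayMomentSequence, a.1 = p.1 := by decide

theorem sequence_in_aliases : ∀ a ∈ dayMomentSequence, ∃ p ∈ momentAliases, p.1 = a.1 := by decide

-- the bridge: normalization returns moment r iff the token is one of r's aliases
theorem norm_eq_some_iff (v : Option String) (r : String) (al : List String)
    (h : (r, al) ∈ momentAliases) :
    (normalize_moment_key_py v = some r ↔ moment_token_py v ∈ al) := by
  rw [normalize_eq_bind, Option.bind_eq_some_iff]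
  constructor
  · rintro ⟨s, hs, hif⟩
    have hsr : s = r := by
      by_cases hone : s = "" <;> simp [hone] at hif <;> exact hif
    subst hsr
    rw [get?_mappingItems] at hs
    exact mapping_to_alias (moment_token_py v, s) hs (s, al) h rfl
  · intro ht
    refine ⟨r, (get?_mappingItems _ _).mpr (alias_to_mapping (r, al) h _ ht), ?_⟩
    simp [moment_ne_empty (r, al) h]

-- A's subset test over the deduplicated key set equals B's per-moment alias scan
theorem subset_eq_alt (items : List (List (String × String))) :
    PySem.Set.issubset (PySem.Set.ofList (dayMomentSequence.map (·.1)))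
      (PySem.Set.ofList ((PySem.Set.ofList (items.map (fun item =>
        normalize_moment_key_py ((PySem.Dict.mk item).get? "moment_key")))).filterMap id))
      = has_complete_day_plan_items_py_alt items := by
  rw [Bool.eq_iff_iff, PySem.Set.issubset_iff]
  simp only [has_complete_day_plan_items_py_alt, List.all_eq_true, List.any_eq_true,
    List.contains_iff_exists_mem_beq, beq_iff_eq, PySem.Set.mem_ofList, List.mem_filterMap,
    id, List.mem_map]
  constructor
  · rintro h p hp
    rcases moment_in_sequence p hp with ⟨a, ha, hap⟩
    rcases h p.1 ⟨a, ha, hap⟩ with ⟨x, ⟨item, hitem, hf⟩, hxr⟩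
    subst hxr
    rw [norm_eq_some_iff _ p.1 p.2 hp] at hf
    exact ⟨item, hitem, _, hf, rfl⟩
  · rintro h r ⟨a, ha, har⟩
    subst har
    rcases sequence_in_aliases a ha with ⟨p, hp, hpa⟩
    rcases h p hp with ⟨item, hitem, x, hx, hxe⟩
    have htok : moment_token_py ((PySem.Dict.mk item).get? "moment_key") ∈ p.2 := by
      rcases hxe with rfl; exact hx
    rw [← norm_eq_some_iff _ p.1 p.2 hp] at htok
    exact ⟨some a.1, ⟨item, hitem, by rw [← hpa]; exact htok⟩, rfl⟩

-- If B succeeds, the four distinct moments each come from some item,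
-- so the deduplicated map has at least four members: A's length guard is redundant.
theorem length_ge_of_alt (items : List (List (String × String)))
    (h : has_complete_day_plan_items_py_alt items = true) : 4 <= items.length := by
  simp only [has_complete_day_plan_items_py_alt, List.all_eq_true, List.any_eq_true,
    List.contains_iff_exists_mem_beq, beq_iff_eq] at h
  have hmem : forall p, p ∈ momentAliases → some p.1 ∈ items.map (fun item =>
      normalize_moment_key_py ((PySem.Dict.mk item).get? "moment_key")) := by
    intro p hp
    rcases h p hp with ⟨item, hitem, x, hx, hxe⟩
    have htok : moment_token_py ((PySem.Dict.mk item).get? "moment_key") ∈ p.2 := by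
      rcases hxe with rfl; exact hx
    rw [← norm_eq_some_iff _ p.1 p.2 hp] at htok
    exact List.mem_map.mpr ⟨item, hitem, htok⟩
  have hsub : ({some "morning", some "midday", some "afternoon", some "evening"} :
      Finset (Option String)) ⊆ (items.map (fun item =>
        normalize_moment_key_py ((PySem.Dict.mk item).get? "moment_key"))).toFinset := by
    intro x hx
    fin_cases hx
    · exact List.mem_toFinset.mpr (hmem ("morning", ["morning", "am", "start_of_day"]) (by decide))
    · exact List.mem_toFinset.mpr (hmem ("midday", ["midday", "mid_day", "lunch"]) (by decide))
    · exact List.mem_toFinset.mpr (hmem ("afternoon", ["pretraining", "pre_training", "afternoon", "training", "session"]) (by decide))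
    · exact List.mem_toFinset.mpr (hmem ("evening", ["evening", "pm", "night", "close_of_day"]) (by decide))
  have hcard := Finset.card_le_card hsub
  have hlen := List.toFinset_card_le (items.map (fun item =>
    normalize_moment_key_py ((PySem.Dict.mk item).get? "moment_key")))
  have h4 : ({some "morning", some "midday", some "afternoon", some "evening"} :
      Finset (Option String)).card = 4 := by decide
  simpa [h4, List.length_map] using hcard.trans hlen

-- ===== VERDICT =====
theorem has_complete_day_plan_items_py_spec : Claim_equal_has_complete_day_plan_items_py := by
  intro items _
  unfold Spec_has_complete_day_plan_items_py has_complete_day_plan_items_py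
  by_cases h4 : items.length < dayMomentSequence.length
  · simp only [h4, if_true]
    rcases hb : has_complete_day_plan_items_py_alt items with _ | _
    · rfl
    · have := length_ge_of_alt items hb
      simp only [dayMomentSequence, List.length_cons, List.length_nil] at h4
      omega
  · simp only [h4, if_false]
    exact subset_eq_alt items
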